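-- pv_equiv track=rewrite | github.com/lav1e2nrose/EMG | src/preprocessing.py | decode_three_state_predictions
-- ===== SOURCE A (Python) =====
-- def decode_three_state_predictions(predictions, min_length=200, merge_gap=100):
--     """
--     Convert per-sample three-state predictions into (start, end) segments.
--     """
--     segments = []
--     in_segment = False
--     start_idx = 0
--
--     for idx, label in enumerate(predictions):
--         if label != 0 and not in_segment:
--             in_segment = True
--             start_idx = idx
--         elif label == 0 and in_segment:
--             in_segment = False
--             end_idx = idx
--             if end_idx - start_idx >= min_length:
--                 segments.append((start_idx, end_idx))
--
--     if in_segment: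
--         end_idx = len(predictions)
--         if end_idx - start_idx >= min_length:
--             segments.append((start_idx, end_idx))
--
--     # Merge close segments to handle brief pauses
--     if len(segments) > 1:
--         merged = [segments[0]]
--         for cur_start, cur_end in segments[1:]:
--             prev_start, prev_end = merged[-1]
--             if cur_start - prev_end <= merge_gap:
--                 merged[-1] = (prev_start, cur_end)
--             else:
--                 merged.append((cur_start, cur_end))
--         segments = merged
--
--     return segments
-- ===== SOURCE B (Python) =====
-- def decode_three_state_predictions(predictions, min_length=200, merge_gap=100):
--     # Boundary detection: compare each adjacent pair of the zero-padded signal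
--     # to list all run starts and all run ends independently, then pair them up.
--     padded = [0] + list(predictions) + [0]
--     pairs = list(zip(padded, padded[1:]))
--     starts = [i for i, (a, b) in enumerate(pairs) if a == 0 and b != 0]
--     ends = [i for i, (a, b) in enumerate(pairs) if a != 0 and b == 0]
--     segments = [(s, e) for s, e in zip(starts, ends) if e - s >= min_length]
--     return _merge_close(segments, merge_gap)
--
--
-- def _merge_close(segments, merge_gap):
--     if len(segments) < 2:
--         return list(segments)
--     (s1, e1), (s2, e2) = segments[0], segments[1]
--     if s2 - e1 <= merge_gap:
--         return _merge_close([(s1, e2)] + segments[2:], merge_gap)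
--     return [segments[0]] + _merge_close(segments[1:], merge_gap)
-- ===== Notes on version B (the rewrite author's own statement) =====
-- stated objective: alternative
-- what changed: Phase 1 replaces A's in_segment state-machine scan with boundary detection: B zips the zero-padded signal with its shift, lists all run-start and run-end indices in two independent comprehensions and pairs them with zip before the min_length filter; phase 2 replaces A's accumulator merge loop with a structural recursion that folds the first two segments or keeps the head.
import Mathlib
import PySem

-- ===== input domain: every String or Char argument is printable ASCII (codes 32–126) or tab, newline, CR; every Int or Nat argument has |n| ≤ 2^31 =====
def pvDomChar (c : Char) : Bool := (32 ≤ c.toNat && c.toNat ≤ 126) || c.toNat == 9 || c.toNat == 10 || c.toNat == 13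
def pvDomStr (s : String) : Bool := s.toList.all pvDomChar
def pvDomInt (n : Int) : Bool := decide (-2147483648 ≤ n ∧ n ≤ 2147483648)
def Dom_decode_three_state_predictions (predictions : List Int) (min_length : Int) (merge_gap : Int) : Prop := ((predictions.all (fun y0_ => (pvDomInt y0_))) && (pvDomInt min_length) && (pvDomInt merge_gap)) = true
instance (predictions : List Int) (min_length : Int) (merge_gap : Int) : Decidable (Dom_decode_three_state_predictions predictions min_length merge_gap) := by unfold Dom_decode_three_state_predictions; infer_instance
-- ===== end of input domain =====

-- B replaces A's in_segment state-machine scan by boundary detection (zip the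
-- zero-padded signal with its shift, list start and end indices independently,
-- pair them with zip) and A's accumulator merge loop by a structural recursion;
-- objective: alternative decomposition (same cost).

-- ===== PORT A =====
-- A's for-loop over enumerate(predictions), state (segments, in_segment, start_idx),
-- idx carried as the Int index; on list end the `if in_segment` fixup uses idx = len(predictions).
def aGo (min_length : Int) : List Int → Int → List (Int × Int) → Bool → Int → List (Int × Int)
  | [], idx, segments, in_seg, start =>
      if in_seg then
        (if idx - start ≥ min_length then segments ++ [(start, idx)] else segments)
      else segments
  | x :: xs, idx, segments, in_seg, start =>
      if x ≠ 0 ∧ in_seg = false then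
        aGo min_length xs (idx + 1) segments true idx
      else if x = 0 ∧ in_seg = true then
        aGo min_length xs (idx + 1)
          (if idx - start ≥ min_length then segments ++ [(start, idx)] else segments) false start
      else
        aGo min_length xs (idx + 1) segments in_seg start

-- A's merge-loop body (merged[-1] lookup; the merged-empty case is unreachable in A,
-- totalized as append which never fires).
def stepA (merge_gap : Int) (merged : List (Int × Int)) (c : Int × Int) : List (Int × Int) :=
  match merged.getLast? with
  | some (ps, pe) =>
      if c.1 - pe ≤ merge_gap then merged.dropLast ++ [(ps, c.2)] else merged ++ [c]
  | none => merged ++ [c]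

def decode_three_state_predictions (predictions : List Int) (min_length : Int) (merge_gap : Int) : List (Int × Int) :=
  let segments := aGo min_length predictions 0 [] false 0
  if segments.length > 1 then
    match segments with
    | [] => segments
    | s :: rest => rest.foldl (stepA merge_gap) [s]
  else segments

-- ===== PORT B =====
-- `[i for i, (a, b) in enumerate(pairs) if a == 0 and b != 0]`
def bStarts (pairs : List (Int × Int)) : List Int :=
  ((PySem.List.enumerate pairs 0).filter (fun p => p.2.1 == 0 && p.2.2 != 0)).map (·.1)

-- `[i for i, (a, b) in enumerate(pairs) if a != 0 and b == 0]`
def bEnds (pairs : List (Int × Int)) : List Int :=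
  ((PySem.List.enumerate pairs 0).filter (fun p => p.2.1 != 0 && p.2.2 == 0)).map (·.1)

-- B's recursive `_merge_close`
def mergeRec (merge_gap : Int) : List (Int × Int) → List (Int × Int)
  | [] => []
  | [s] => [s]
  | (s1, e1) :: (s2, e2) :: r =>
      if s2 - e1 ≤ merge_gap then mergeRec merge_gap ((s1, e2) :: r)
      else (s1, e1) :: mergeRec merge_gap ((s2, e2) :: r)
termination_by l => l.length

def decode_three_state_predictions_alt (predictions : List Int) (min_length : Int) (merge_gap : Int) : List (Int × Int) :=
  let padded := 0 :: (predictions ++ [0])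
  let pairs := padded.zip padded.tail
  let starts := bStarts pairs
  let ends := bEnds pairs
  let segments := (starts.zip ends).filter (fun se => se.2 - se.1 ≥ min_length)
  mergeRec merge_gap segments

-- ===== PRECONDITION & SPEC =====
def Spec_decode_three_state_predictions (predictions : List Int) (min_length : Int) (merge_gap : Int) (out : List (Int × Int)) : Prop := out = decode_three_state_predictions_alt predictions min_length merge_gap
instance (predictions : List Int) (min_length : Int) (merge_gap : Int) (out : List (Int × Int)) : Decidable (Spec_decode_three_state_predictions predictions min_length merge_gap out) := by unfold Spec_decode_three_state_predictions; infer_instance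

-- ===== CLAIM (what is proved, stated in full; the proofs are below) =====
def Claim_equal_decode_three_state_predictions : Prop := ∀ (predictions : List Int) (min_length : Int) (merge_gap : Int), Dom_decode_three_state_predictions predictions min_length merge_gap → Spec_decode_three_state_predictions predictions min_length merge_gap (decode_three_state_predictions predictions min_length merge_gap)

-- ===== LEMMAS AND PROOFS =====

-- ---- proof-side helpers ----

-- length of the leading nonzero run and the remainder of the list
def skipRun : List Int → Int × List Int
  | [] => (0, [])
  | x :: xs => if x ≠ 0 then ((skipRun xs).1 + 1, (skipRun xs).2) else (0, x :: xs)

theorem skipRun_len_le : ∀ l : List Int, (skipRun l).2.length ≤ l.length := by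
  intro l; induction l with
  | nil => simp [skipRun]
  | cons x xs ih => by_cases h : x = (0 : Int) <;> simp [skipRun, h] <;> omega

-- canonical run list (filtered by min_length), shared middle point of both proofs
def bGo (min_length : Int) : List Int → Int → List (Int × Int)
  | [], _ => []
  | x :: xs, i =>
      if x = 0 then bGo min_length xs (i + 1)
      else
        let p := skipRun (x :: xs)
        (if p.1 ≥ min_length then [(i, i + p.1)] else []) ++ bGo min_length p.2 (i + p.1)
termination_by l => l.length
decreasing_by
  · simp
  · simp only [skipRun, if_pos (by simpa using ‹¬ x = 0›)]
    exact Nat.lt_succ_of_le (skipRun_len_le xs)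

-- recursive characterizations of B's boundary lists (prev = element before l)
def Sgo : Int → List Int → Int → List Int
  | _, [], _ => []
  | prev, x :: xs, i => (if prev = 0 ∧ x ≠ 0 then [i] else []) ++ Sgo x xs (i + 1)

def Ego : Int → List Int → Int → List Int
  | prev, [], i => if prev ≠ 0 then [i] else []
  | prev, x :: xs, i => (if prev ≠ 0 ∧ x = 0 then [i] else []) ++ Ego x xs (i + 1)

-- the fold form of the merge, shared middle point of both merge proofs
def stepB (merge_gap : Int) (merged : List (Int × Int)) (c : Int × Int) : List (Int × Int) :=
  match merged.getLast? with
  | some (ps, pe) =>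
      if c.1 - pe ≤ merge_gap then merged.dropLast ++ [(ps, c.2)] else merged ++ [c]
  | none => merged ++ [c]

-- ---- A's phase 1 = bGo ----

theorem skipRun_head : ∀ l : List Int, (skipRun l).2 = [] ∨ ∃ r, (skipRun l).2 = 0 :: r := by
  intro l; induction l with
  | nil => left; simp [skipRun]
  | cons x xs ih =>
      by_cases h : x = (0 : Int)
      · right; exact ⟨xs, by simp [skipRun, h]⟩
      · simpa [skipRun, h] using ih

theorem aGo_true (min_length : Int) : ∀ (l : List Int) (idx : Int) (segs : List (Int × Int)) (start : Int),
    aGo min_length l idx segs true start =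
      (let segs' := if idx + (skipRun l).1 - start ≥ min_length
                    then segs ++ [(start, idx + (skipRun l).1)] else segs
       match (skipRun l).2 with
       | [] => segs'
       | _ :: r => aGo min_length r (idx + (skipRun l).1 + 1) segs' false start) := by
  intro l
  induction l with
  | nil => intro idx segs start; simp [aGo, skipRun]
  | cons x xs ih =>
      intro idx segs start
      by_cases h : x = (0 : Int)
      · simp [aGo, h, skipRun]
      · have : aGo min_length (x :: xs) idx segs true start
            = aGo min_length xs (idx + 1) segs true start := by
          simp [aGo, h]
        rw [this, ih]
        simp only [skipRun, if_pos (by simpa using h)]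
        have e1 : idx + 1 + (skipRun xs).1 = idx + ((skipRun xs).1 + 1) := by ring
        rw [e1]

theorem aGo_false (min_length : Int) : ∀ (n : Nat) (l : List Int), l.length ≤ n →
    ∀ (idx : Int) (segs : List (Int × Int)) (start : Int),
    aGo min_length l idx segs false start = segs ++ bGo min_length l idx := by
  intro n
  induction n with
  | zero =>
      intro l hl idx segs start
      have : l = [] := List.eq_nil_of_length_eq_zero (Nat.le_zero.mp hl)
      subst this; simp [aGo, bGo.eq_def]
  | succ n ih =>
      intro l hl idx segs start
      match l with
      | [] => simp [aGo, bGo.eq_def]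
      | x :: xs =>
        by_cases h : x = (0 : Int)
        · have ha : aGo min_length (x :: xs) idx segs false start
              = aGo min_length xs (idx + 1) segs false start := by simp [aGo, h]
          have hb : bGo min_length (x :: xs) idx = bGo min_length xs (idx + 1) := by
            rw [bGo.eq_def]; simp [h]
          rw [ha, hb, ih xs (by simpa using hl)]
        · have ha : aGo min_length (x :: xs) idx segs false start
              = aGo min_length xs (idx + 1) segs true idx := by simp [aGo, h]
          have hb : bGo min_length (x :: xs) idx =
              (if (skipRun (x :: xs)).1 ≥ min_length
               then [(idx, idx + (skipRun (x :: xs)).1)] else []) ++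
                bGo min_length (skipRun (x :: xs)).2 (idx + (skipRun (x :: xs)).1) := by
            rw [bGo.eq_def]; simp [h]
          rw [ha, aGo_true, hb]
          simp only [skipRun, if_pos (by simpa using h)]
          obtain ⟨m, rest, hmr⟩ : ∃ m rest, skipRun xs = (m, rest) := ⟨_, _, rfl⟩
          rw [hmr]
          simp only
          have hrl : rest.length ≤ n := by
            have h1 := skipRun_len_le xs
            rw [hmr] at h1
            simp at hl h1 ⊢
            omega
          have e1 : idx + 1 + m = idx + (m + 1) := by ring
          have e2 : idx + 1 + m - idx = m + 1 := by ring
          rcases skipRun_head xs with h0 | ⟨r, hr⟩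
          · rw [hmr] at h0
            subst h0
            have hb0 : bGo min_length [] (idx + (m + 1)) = [] := by rw [bGo.eq_def]
            simp only [hb0, List.append_nil, e1]
            have e4 : idx + (m + 1) - idx = m + 1 := by ring
            rw [e4]
            by_cases hc : min_length ≤ m + 1 <;> simp [hc, ge_iff_le]
          · rw [hmr] at hr
            subst hr
            have hb0 : bGo min_length (0 :: r) (idx + (m + 1))
                = bGo min_length r (idx + (m + 1) + 1) := by
              rw [bGo.eq_def]; simp
            simp only [hb0, e1]
            rw [ih r (by simp at hrl; omega)]
            have e4 : idx + (m + 1) - idx = m + 1 := by ring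
            rw [e4]
            by_cases hc : min_length ≤ m + 1 <;> simp [hc, ge_iff_le]

-- ---- B's phase 1 = bGo ----

-- the port's comprehensions over the zipped padded list equal Sgo/Ego
theorem bStarts_eq : ∀ (l : List Int) (prev i : Int),
    ((PySem.List.enumerate ((prev :: (l ++ [0])).zip (l ++ [0])) i).filter
        (fun p => p.2.1 == 0 && p.2.2 != 0)).map (·.1) = Sgo prev l i := by
  intro l
  induction l with
  | nil =>
      intro prev i
      simp [PySem.List.enumerate_cons, PySem.List.enumerate_nil, Sgo, List.filter]
  | cons x xs ih =>
      intro prev i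
      have : (prev :: ((x :: xs) ++ [0])).zip ((x :: xs) ++ [0])
          = (prev, x) :: (x :: (xs ++ [0])).zip (xs ++ [0]) := by simp
      rw [this, PySem.List.enumerate_cons]
      by_cases h1 : prev = 0 ∧ x ≠ 0
      · have hx : (x != 0) = true := by simpa using h1.2
        simp [List.filter, h1.1, hx, Sgo, h1.2, ih]
      · have : ¬ ((prev == 0) && (x != 0)) = true := by
          simp only [Bool.and_eq_true, beq_iff_eq, bne_iff_ne, ne_eq]; exact h1
        simp only [List.filter, this, Sgo, if_neg h1, List.nil_append]
        exact ih x (i + 1)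

theorem bEnds_eq : ∀ (l : List Int) (prev i : Int),
    ((PySem.List.enumerate ((prev :: (l ++ [0])).zip (l ++ [0])) i).filter
        (fun p => p.2.1 != 0 && p.2.2 == 0)).map (·.1) = Ego prev l i := by
  intro l
  induction l with
  | nil =>
      intro prev i
      by_cases h : prev = 0 <;>
        simp [PySem.List.enumerate_cons, PySem.List.enumerate_nil, Ego, List.filter, h]
  | cons x xs ih =>
      intro prev i
      have : (prev :: ((x :: xs) ++ [0])).zip ((x :: xs) ++ [0])
          = (prev, x) :: (x :: (xs ++ [0])).zip (xs ++ [0]) := by simp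
      rw [this, PySem.List.enumerate_cons]
      by_cases h1 : prev ≠ 0 ∧ x = 0
      · have hp : (prev != 0) = true := by simpa using h1.1
        simp [List.filter, hp, h1.2, Ego, h1.1, ih]
      · have : ¬ ((prev != 0) && (x == 0)) = true := by
          simp only [Bool.and_eq_true, beq_iff_eq, bne_iff_ne, ne_eq]; exact h1
        simp only [List.filter, this, Ego, if_neg h1, List.nil_append]
        exact ih x (i + 1)

-- inside a nonzero run there are no starts until after the closing zero
theorem Sgo_run : ∀ (l : List Int) (i a : Int), a ≠ 0 →
    Sgo a l i = (match (skipRun l).2 with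
                 | [] => []
                 | _ :: r => Sgo 0 r (i + (skipRun l).1 + 1)) := by
  intro l
  induction l with
  | nil => intro i a _; simp [Sgo, skipRun]
  | cons x xs ih =>
      intro i a ha
      by_cases h : x = (0 : Int)
      · subst h
        simp [Sgo, skipRun, ha]
      · have : Sgo a (x :: xs) i = Sgo x xs (i + 1) := by simp [Sgo, ha]
        rw [this, ih (i + 1) x h]
        simp only [skipRun, if_pos (by simpa using h)]
        have e : i + 1 + (skipRun xs).1 = i + ((skipRun xs).1 + 1) := by ring
        rw [e]

-- the run's single end is at its closing zero (or at the list end)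
theorem Ego_run : ∀ (l : List Int) (i a : Int), a ≠ 0 →
    Ego a l i = (i + (skipRun l).1) ::
      (match (skipRun l).2 with
       | [] => []
       | _ :: r => Ego 0 r (i + (skipRun l).1 + 1)) := by
  intro l
  induction l with
  | nil => intro i a ha; simp [Ego, skipRun, ha]
  | cons x xs ih =>
      intro i a ha
      by_cases h : x = (0 : Int)
      · subst h
        simp [Ego, skipRun, ha]
      · have : Ego a (x :: xs) i = Ego x xs (i + 1) := by simp [Ego, ha, h]
        rw [this, ih (i + 1) x h]
        simp only [skipRun, if_pos (by simpa using h)]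
        have e : i + 1 + (skipRun xs).1 = i + ((skipRun xs).1 + 1) := by ring
        rw [e]

-- pairing starts with ends and filtering by min_length gives exactly bGo
theorem zip_SE_eq_bGo (min_length : Int) : ∀ (n : Nat) (l : List Int), l.length ≤ n → ∀ (i : Int),
    ((Sgo 0 l i).zip (Ego 0 l i)).filter (fun se => se.2 - se.1 ≥ min_length)
      = bGo min_length l i := by
  intro n
  induction n with
  | zero =>
      intro l hl i
      have : l = [] := List.eq_nil_of_length_eq_zero (Nat.le_zero.mp hl)
      subst this; simp [Sgo, Ego, bGo.eq_def]
  | succ n ih =>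
      intro l hl i
      match l with
      | [] => simp [Sgo, Ego, bGo.eq_def]
      | x :: xs =>
        by_cases h : x = (0 : Int)
        · subst h
          have hs : Sgo 0 ((0 : Int) :: xs) i = Sgo 0 xs (i + 1) := by simp [Sgo]
          have he : Ego 0 ((0 : Int) :: xs) i = Ego 0 xs (i + 1) := by simp [Ego]
          have hb : bGo min_length ((0 : Int) :: xs) i = bGo min_length xs (i + 1) := by
            rw [bGo.eq_def]; simp
          rw [hs, he, hb, ih xs (by simpa using hl)]
        · have hs : Sgo 0 (x :: xs) i = i :: Sgo x xs (i + 1) := by simp [Sgo, h]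
          have he : Ego 0 (x :: xs) i = Ego x xs (i + 1) := by simp [Ego, h]
          rw [hs, he, Sgo_run xs (i + 1) x h, Ego_run xs (i + 1) x h]
          obtain ⟨m, rest, hmr⟩ : ∃ m rest, skipRun xs = (m, rest) := ⟨_, _, rfl⟩
          rw [hmr]
          have hrl : rest.length ≤ n := by
            have h1 := skipRun_len_le xs
            rw [hmr] at h1
            simp at hl h1 ⊢
            omega
          have hb : bGo min_length (x :: xs) i =
              (if m + 1 ≥ min_length then [(i, i + (m + 1))] else []) ++
                bGo min_length rest (i + (m + 1)) := by
            rw [bGo.eq_def]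
            simp only [skipRun, if_pos (by simpa using h), hmr, if_neg h]
          rw [hb]
          have e1 : i + 1 + m = i + (m + 1) := by ring
          rcases skipRun_head xs with h0 | ⟨r, hr⟩
          · rw [hmr] at h0; subst h0
            have hb0 : bGo min_length [] (i + (m + 1)) = [] := by rw [bGo.eq_def]
            have e4 : i + (m + 1) - i = m + 1 := by ring
            simp only [hb0, List.append_nil, e1, List.zip_cons_cons, List.zip_nil_right,
              List.filter, ge_iff_le, e4]
            by_cases hc : min_length ≤ m + 1 <;> simp [hc]
          · rw [hmr] at hr; subst hr
            have hb0 : bGo min_length ((0 : Int) :: r) (i + (m + 1))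
                = bGo min_length r (i + (m + 1) + 1) := by
              rw [bGo.eq_def]; simp
            have e5 : i + 1 + m + 1 = i + (m + 1) + 1 := by ring
            have e4 : i + (m + 1) - i = m + 1 := by ring
            simp only [e1, hb0, List.zip_cons_cons, List.filter, ge_iff_le, e4]
            rw [ih r (by simp at hrl; omega) (i + (m + 1) + 1)]
            by_cases hc : min_length ≤ m + 1 <;> simp [hc]

-- ---- merge phase: both forms equal the fold ----

theorem stepB_append (g : Int) (a m : List (Int × Int)) (c : Int × Int) (hm : m ≠ []) :
    stepB g (a ++ m) c = a ++ stepB g m c ∧ stepB g m c ≠ [] := by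
  unfold stepB
  match m, hm with
  | y :: ys, _ =>
    rw [List.getLast?_append_of_ne_nil _ (by simp)]
    match hgl : (y :: ys).getLast? with
    | some (ps, pe) =>
        by_cases hc : c.1 - pe ≤ g
        · simp [hc, List.dropLast_append_of_ne_nil]
        · simp [hc]
    | none => simp at hgl

theorem foldl_stepB_append (g : Int) : ∀ (r : List (Int × Int)) (a m : List (Int × Int)),
    m ≠ [] → r.foldl (stepB g) (a ++ m) = a ++ r.foldl (stepB g) m := by
  intro r
  induction r with
  | nil => intro a m _; simp
  | cons c cs ih =>
      intro a m hm
      obtain ⟨h1, h2⟩ := stepB_append g a m c hm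
      simp only [List.foldl_cons, h1]
      exact ih a _ h2

theorem mergeRec_eq_foldl (g : Int) : ∀ (n : Nat) (segs : List (Int × Int)),
    segs.length ≤ n → mergeRec g segs = segs.foldl (stepB g) [] := by
  intro n
  induction n with
  | zero =>
      intro segs hl
      have : segs = [] := List.eq_nil_of_length_eq_zero (Nat.le_zero.mp hl)
      subst this; simp [mergeRec]
  | succ n ih =>
      intro segs hl
      match segs with
      | [] => simp [mergeRec]
      | [s] => simp [mergeRec, stepB]
      | (s1, e1) :: (s2, e2) :: r =>
        have hstep0 : stepB g [] (s1, e1) = [(s1, e1)] := by simp [stepB]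
        have hstep1 : stepB g [(s1, e1)] (s2, e2)
            = if s2 - e1 ≤ g then [(s1, e2)] else [(s1, e1), (s2, e2)] := by
          simp [stepB]
        by_cases hc : s2 - e1 ≤ g
        · have : mergeRec g ((s1, e1) :: (s2, e2) :: r) = mergeRec g ((s1, e2) :: r) := by
            rw [mergeRec.eq_def]; simp [hc]
          rw [this, ih ((s1, e2) :: r) (by simp at hl ⊢; omega)]
          simp [hc, stepB]
        · have : mergeRec g ((s1, e1) :: (s2, e2) :: r)
              = (s1, e1) :: mergeRec g ((s2, e2) :: r) := by
            rw [mergeRec.eq_def]; simp [hc]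
          rw [this, ih ((s2, e2) :: r) (by simp at hl ⊢; omega)]
          simp only [List.foldl_cons, hstep0, hstep1, if_neg hc]
          have := foldl_stepB_append g r [(s1, e1)] [(s2, e2)] (by simp)
          simp only [List.cons_append, List.nil_append] at this ⊢
          rw [this]
          simp [stepB]

theorem mergeA_eq_foldl (merge_gap : Int) (segs : List (Int × Int)) :
    (if segs.length > 1 then
      match segs with
      | [] => segs
      | s :: rest => rest.foldl (stepA merge_gap) [s]
     else segs) = segs.foldl (stepB merge_gap) [] := by
  match segs with
  | [] => simp
  | [s] => simp [stepB]
  | s :: t :: r =>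
      have h1 : stepB merge_gap [] s = [s] := by simp [stepB]
      have h2 : stepA merge_gap = stepB merge_gap := rfl
      simp only [List.length_cons, List.foldl_cons, h1, h2]
      rw [if_pos (by omega)]

-- ===== VERDICT (by name: the statement is the Claim_ definition above) =====
theorem decode_three_state_predictions_spec : Claim_equal_decode_three_state_predictions := by
  intro predictions min_length merge_gap _
  unfold Spec_decode_three_state_predictions
  unfold decode_three_state_predictions decode_three_state_predictions_alt
  simp only [List.tail_cons, bStarts, bEnds]
  rw [bStarts_eq predictions 0 0, bEnds_eq predictions 0 0,
    zip_SE_eq_bGo min_length predictions.length predictions le_rfl 0,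
    aGo_false min_length predictions.length predictions le_rfl]
  simp only [List.nil_append]
  rw [mergeA_eq_foldl merge_gap (bGo min_length predictions 0),
    mergeRec_eq_foldl merge_gap (bGo min_length predictions 0).length _ le_rfl]
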